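-- pv_equiv track=rewrite | github.com/fevenissayas/python-practice | elevator_stimulator.py | elevator
-- ===== SOURCE A (Python) =====
-- def elevator (x):
--     floor = 0
--     for i in x:
--         if i == '^':
--             floor += 1
--         elif i == 'v':
--             if floor > 0:
--                 floor -= 1
--
--     return floor
-- ===== SOURCE B (Python) =====
-- def elevator(x):
--     s = 0
--     low = 0
--     for i in x:
--         if i == '^':
--             s += 1
--         elif i == 'v':
--             s -= 1
--         if s < low:
--             low = s
--     return s - low
-- ===== Notes on version B (the rewrite author's own statement) =====
-- stated objective: alternative
-- what changed: Replaces the per-step zero-clamp branch with an unclamped running sum plus a running minimum of prefix sums, returning sum minus minimum (reflection identity for unit steps).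
import Mathlib
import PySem

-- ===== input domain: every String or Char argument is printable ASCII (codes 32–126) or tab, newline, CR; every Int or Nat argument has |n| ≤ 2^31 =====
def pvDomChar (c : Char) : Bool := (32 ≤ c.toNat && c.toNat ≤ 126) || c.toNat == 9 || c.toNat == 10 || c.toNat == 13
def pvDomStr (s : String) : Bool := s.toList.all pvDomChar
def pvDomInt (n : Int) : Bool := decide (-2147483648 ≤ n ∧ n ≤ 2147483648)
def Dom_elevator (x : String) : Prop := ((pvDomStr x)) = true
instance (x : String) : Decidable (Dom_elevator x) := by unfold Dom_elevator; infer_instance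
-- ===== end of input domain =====

-- B replaces A's per-step zero-clamp branch with an unclamped running sum and a running
-- minimum of prefix sums, returning sum minus minimum (alternative decomposition, same cost).

-- ===== PORT A =====
-- A's loop: clamp at zero on every 'v'
def elevator (x : String) : Int :=
  x.toList.foldl
    (fun floor i =>
      if i = '^' then floor + 1
      else if i = 'v' then (if floor > 0 then floor - 1 else floor)
      else floor)
    0

-- ===== PORT B =====
-- B's loop: signed sum s and running minimum low, answer s - low
def elevator_alt (x : String) : Int :=
  let p := x.toList.foldl
    (fun (sl : Int × Int) i =>
      let s := if i = '^' then sl.1 + 1 else if i = 'v' then sl.1 - 1 else sl.1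
      (s, if s < sl.2 then s else sl.2))
    (0, 0)
  p.1 - p.2

-- ===== PRECONDITION & SPEC =====
def Spec_elevator (x : String) (out : Int) : Prop := out = elevator_alt x
instance (x : String) (out : Int) : Decidable (Spec_elevator x out) := by unfold Spec_elevator; infer_instance

-- ===== CLAIM (what is proved, stated in full; the proofs are below) =====
def Claim_equal_elevator : Prop := ∀ (x : String), Dom_elevator x → Spec_elevator x (elevator x)

-- ===== LEMMAS AND PROOFS =====

-- Loop invariant: starting B's fold from (s, low) with low ≤ s, the final pair (s', low')
-- satisfies low' ≤ s' and A's fold from s - low ends at s' - low'.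
theorem elevator_fold_inv (l : List Char) (s low : Int) (h : low ≤ s) :
    (l.foldl (fun (sl : Int × Int) i =>
        let s := if i = '^' then sl.1 + 1 else if i = 'v' then sl.1 - 1 else sl.1
        (s, if s < sl.2 then s else sl.2)) (s, low)).2
      ≤ (l.foldl (fun (sl : Int × Int) i =>
        let s := if i = '^' then sl.1 + 1 else if i = 'v' then sl.1 - 1 else sl.1
        (s, if s < sl.2 then s else sl.2)) (s, low)).1
    ∧ l.foldl (fun floor i =>
        if i = '^' then floor + 1
        else if i = 'v' then (if floor > 0 then floor - 1 else floor)
        else floor) (s - low)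
      = (l.foldl (fun (sl : Int × Int) i =>
        let s := if i = '^' then sl.1 + 1 else if i = 'v' then sl.1 - 1 else sl.1
        (s, if s < sl.2 then s else sl.2)) (s, low)).1
      - (l.foldl (fun (sl : Int × Int) i =>
        let s := if i = '^' then sl.1 + 1 else if i = 'v' then sl.1 - 1 else sl.1
        (s, if s < sl.2 then s else sl.2)) (s, low)).2 := by
  induction l generalizing s low with
  | nil => simpa using h
  | cons c t ih =>
    by_cases h1 : c = '^'
    · -- '^': both sums rise by one; the minimum cannot move
      subst h1
      have hlow : ¬ (s + 1 < low) := by omega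
      simp only [List.foldl_cons, Char.reduceEq, reduceIte]
      rw [if_neg hlow, show s - low + 1 = s + 1 - low by ring]
      exact ih (s + 1) low (by omega)
    · by_cases h2 : c = 'v'
      · subst h2
        simp only [List.foldl_cons, Char.reduceEq, reduceIte]
        by_cases h3 : low < s
        · -- floor = s - low > 0: the clamp does not fire, the minimum stays
          rw [if_neg (by omega : ¬ (s - 1 < low)),
            if_pos (by omega : s - low > 0),
            show s - low - 1 = s - 1 - low by ring]
          exact ih (s - 1) low (by omega)
        · -- floor = 0: A clamps; B's minimum drops to s - 1
          rw [if_pos (by omega : s - 1 < low),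
            if_neg (by omega : ¬ (s - low > 0)),
            show s - low = (s - 1) - (s - 1) by omega]
          exact ih (s - 1) (s - 1) le_rfl
      · -- any other character: both states unchanged
        simp only [List.foldl_cons]
        rw [if_neg h1, if_neg h2, if_neg h1, if_neg h2,
          if_neg (by omega : ¬ (s < low))]
        exact ih s low h

-- ===== VERDICT (by name: the statement is the Claim_ definition above) =====
theorem elevator_spec : Claim_equal_elevator := by
  intro x _
  unfold Spec_elevator elevator elevator_alt
  have h := elevator_fold_inv x.toList 0 0 le_rfl
  simpa using h.2
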